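-- pv_equiv track=rewrite | github.com/pypi-data/pypi-mirror-392 | packages/pyqcisim/pyqcisim-1.3.6rc1.tar.gz/pyqcisim-1.3.6rc1/src/pyqcisim/utils.py | count_final_result
-- ===== SOURCE A (Python) =====
-- def is_number(s):
--     try:
--         float(s)
--         return True
--     except ValueError:
--         return False
--
-- def get_bin(x, n, Unsigned=True):
--     """
--     Return the 2's complement of the integer number $x$
--     for a given bitwidth $n$.
--     """
--     if not is_number(x):
--         raise ValueError("get_bin: parameter {} is not a number.".format(x))
--
--     if Unsigned is True:
--         return "{0:{fill}{width}b}".format(int(x), fill="0", width=n)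
--     else:
--         return "{0:{fill}{width}b}".format((int(x) + 2**n) % 2**n, fill="0", width=n)
--
-- def count_final_result(final_results):
--     if len(final_results) == 0:
--         return None
--
--     num_qubits = len(final_results[0])
--     if num_qubits == 0:
--         return None
--
--     assert all([len(one_result) == num_qubits for one_result in final_results])
--
--     name_list = []
--     for name in final_results[0]:
--         name_list.append(name)
--
--     result_vector = [0] * (2**num_qubits)
--
--     for one_round_msmt in final_results:
--         bin_addr = 0
--         shift = 0
--         for qubit_name in name_list:
--             bin_addr += one_round_msmt[qubit_name] << shift
--             shift += 1
--         result_vector[bin_addr] += 1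
--     res_dict = {}
--     for i in range(len(result_vector)):
--         res_dict[get_bin(i, num_qubits)] = result_vector[i]
--
--     return (name_list, res_dict)
-- ===== SOURCE B (Python) =====
-- def count_final_result(final_results):
--     if not final_results:
--         return None
--     first = final_results[0]
--     n = len(first)
--     if n == 0:
--         return None
--     assert all(len(one_result) == n for one_result in final_results)
--     name_list = [name for name in first]
--     # one bitstring per round (MSB = last qubit name), then SORT them and
--     # merge the sorted run against the enumeration of all 2**n patterns
--     keys = sorted(
--         ''.join(str(one_round_msmt[q]) for q in reversed(name_list))
--         for one_round_msmt in final_results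
--     )
--     res_dict = {}
--     j = 0
--     for i in range(2 ** n):
--         bits = format(i, '0{}b'.format(n))
--         c = 0
--         while j < len(keys) and keys[j] == bits:
--             c += 1
--             j += 1
--         res_dict[bits] = c
--     return (name_list, res_dict)
-- ===== Notes on version B (the rewrite author's own statement) =====
-- stated objective: alternative
-- what changed: A accumulates every round into a bit-shifted integer address of a preallocated 2^n histogram vector and relabels it through get_bin; B builds one bitstring per round, SORTS that list, and produces the histogram by a single two-pointer merge of the sorted run against the enumeration of all 2^n patterns, with no histogram vector or counting dict at all.
-- outside the precondition, e.g. on count_final_result([{'q': -1}]): A returns (['q'], {'0': 0, '1': 1}), B returns (['q'], {'0': 0, '1': 0})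
import Mathlib
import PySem

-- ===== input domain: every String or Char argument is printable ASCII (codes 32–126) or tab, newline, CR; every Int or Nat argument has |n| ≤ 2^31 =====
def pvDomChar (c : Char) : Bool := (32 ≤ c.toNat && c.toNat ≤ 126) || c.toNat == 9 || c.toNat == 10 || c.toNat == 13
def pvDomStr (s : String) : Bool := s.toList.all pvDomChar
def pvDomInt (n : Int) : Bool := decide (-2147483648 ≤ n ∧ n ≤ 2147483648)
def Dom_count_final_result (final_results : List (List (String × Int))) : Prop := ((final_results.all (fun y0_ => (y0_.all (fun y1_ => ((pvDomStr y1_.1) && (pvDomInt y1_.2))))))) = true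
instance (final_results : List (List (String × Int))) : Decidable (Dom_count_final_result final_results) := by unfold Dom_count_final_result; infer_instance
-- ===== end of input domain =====

-- B replaces A's bit-shifted integer addressing into a 2^n histogram vector by sorting the
-- rounds' bitstrings and merging the sorted run against the 2^n patterns (alternative algorithm).

-- ===== PORT A =====
-- A's get_bin as called by A: x is an int, so is_number(x) is always True, and only the
-- Unsigned=True branch runs: zero-filled binary format = Str.zfill ∘ Int.toBin (exact).
def get_bin (x : Int) (n : Int) : String :=
  PySem.Str.zfill (PySem.Int.toBin x) n

def count_final_result (final_results : List (List (String × Int))) :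
    Option (List String × (List (String × Int))) :=
  if final_results.length = 0 then none else
  let num_qubits : Nat := (final_results.headD []).length
  if num_qubits = 0 then none else
  -- Python: assert all(len(one_result) == num_qubits …); AssertionError inputs lie outside Pre_
  if !(final_results.all (fun r => r.length = num_qubits)) then none else
  let name_list : List String :=
    (final_results.headD []).foldl (fun acc p => acc ++ [p.1]) []
  let result_vector0 : List Int := List.replicate (2 ^ num_qubits) 0
  let result_vector : List Int := final_results.foldl (fun vec one_round_msmt =>
      -- dict subscript one_round_msmt[qubit_name]: KeyError inputs lie outside Pre_
      let bin_addr : Int := (name_list.foldl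
        (fun (st : Int × Nat) qubit_name =>
          (st.1 + PySem.Dict.getD (PySem.Dict.mk one_round_msmt) qubit_name (0 : Int) <<< st.2, st.2 + 1))
        ((0 : Int), (0 : Nat))).1
      -- result_vector[bin_addr] += 1 (negative bin_addr wraps as in Python; IndexError inputs lie outside Pre_)
      PySem.List.pySetD vec bin_addr (PySem.List.pyGetD vec bin_addr 0 + 1)) result_vector0
  let res_dict : PySem.Dict String Int :=
    (PySem.List.pyRange 0 (result_vector.length : Int) 1).foldl
      (fun d i => d.insert (get_bin i (num_qubits : Int)) (PySem.List.pyGetD result_vector i 0))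
      PySem.Dict.empty
  some (name_list, res_dict.items)

-- ===== PORT B =====
def count_final_result_alt (final_results : List (List (String × Int))) :
    Option (List String × (List (String × Int))) :=
  match final_results with
  | [] => none
  | first :: _ =>
    if first.length = 0 then none else
    let name_list : List String := first.map Prod.fst
    let n : Nat := name_list.length
    if !(final_results.all (fun r => r.length = n)) then none else
    -- one bitstring per round, then sorted() (no key, ascending)
    let keys : List String := PySem.List.sorted
      (final_results.map (fun one_round_msmt =>
        PySem.Str.join "" (name_list.reverse.map
          (fun q => PySem.Int.toStr (PySem.Dict.getD (PySem.Dict.mk one_round_msmt) q 0)))))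
      (fun s => s) false
    -- merge the sorted run against the 2^n patterns; the Python index j into keys is
    -- represented by the remaining suffix of keys (the while loop consumes a prefix)
    let st : PySem.Dict String Int × List String := (List.range (2 ^ n)).foldl
      (fun (st : PySem.Dict String Int × List String) (i : Nat) =>
        let bits := get_bin (i : Int) (n : Int)
        (st.1.insert bits ((st.2.takeWhile (fun k => k == bits)).length : Int),
         st.2.dropWhile (fun k => k == bits)))
      (PySem.Dict.empty, keys)
    some (name_list, st.1.items)

-- ===== PRECONDITION & SPEC =====
-- Pre_ keeps the natural domain of genuine measurement records: every round is a duplicate-free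
-- dict over exactly the first round's qubit names with bit values 0/1; it excludes malformed
-- rounds, on which A raises (KeyError / IndexError / AssertionError) or, for negative values,
-- mis-buckets via Python's negative-index wraparound.
def Pre_count_final_result (final_results : List (List (String × Int))) : Prop :=
  ∀ first ∈ final_results.take 1, first.length = 0 ∨
    ∀ r ∈ final_results, r.length = first.length ∧ (r.map Prod.fst).Nodup ∧
      (∀ q ∈ first.map Prod.fst, q ∈ r.map Prod.fst) ∧
      ∀ p ∈ r, p.2 = 0 ∨ p.2 = 1
instance (final_results : List (List (String × Int))) : Decidable (Pre_count_final_result final_results) := by unfold Pre_count_final_result; infer_instance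

def pvWitness_count_final_result : (List (List (String × Int))) :=
  [[("a", 0), ("b", 1)], [("a", 1), ("b", 1)], [("a", 0), ("b", 1)]]

def Spec_count_final_result (final_results : List (List (String × Int))) (out : Option (List String × (List (String × Int)))) : Prop := out = count_final_result_alt final_results
instance (final_results : List (List (String × Int))) (out : Option (List String × (List (String × Int)))) : Decidable (Spec_count_final_result final_results out) := by unfold Spec_count_final_result; infer_instance

-- ===== CLAIM (what is proved, stated in full; the proofs are below) =====
def Claim_equal_count_final_result : Prop := ∀ (final_results : List (List (String × Int))), Dom_count_final_result final_results → Pre_count_final_result final_results → Spec_count_final_result final_results (count_final_result final_results)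

-- ===== LEMMAS AND PROOFS =====

-- the character str(v) contributes for a bit value v
def pvBitc (v : Int) : Char := if v = 1 then '1' else '0'

-- value of a little-endian bit list (head = least significant)
def pvLowVal : List Int → Int
  | [] => 0
  | v :: t => v + 2 * pvLowVal t

-- decoder of a zero-filled binary string
def pvDec (cs : List Char) : Nat := cs.foldl (fun a c => 2 * a + (if c = '1' then 1 else 0)) 0

theorem pv_addr_foldl (names : List String) (f : String → Int) (a : Int) (s : Nat) :
    (names.foldl (fun (st : Int × Nat) q => (st.1 + f q <<< st.2, st.2 + 1)) (a, s)).1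
      = a + 2 ^ s * pvLowVal (names.map f) := by
  induction names generalizing a s with
  | nil => simp [pvLowVal]
  | cons q rest ih =>
    rw [List.foldl_cons, ih]
    simp only [List.map_cons, pvLowVal, Int.shiftLeft_eq]
    ring

theorem pv_lowVal_bounds (vs : List Int) (h : ∀ v ∈ vs, v = 0 ∨ v = 1) :
    0 ≤ pvLowVal vs ∧ pvLowVal vs < 2 ^ vs.length := by
  induction vs with
  | nil => simp [pvLowVal]
  | cons v t ih =>
    have hb := ih (fun x hx => h x (List.mem_cons_of_mem _ hx))
    have hv := h v (List.mem_cons_self ..)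
    simp only [pvLowVal, List.length_cons, pow_succ]
    rcases hv with hv | hv <;> subst hv <;> constructor <;> omega

theorem pv_toDigits_bits (m : Nat) : ∀ c ∈ Nat.toDigits 2 m, c = '0' ∨ c = '1' := by
  induction m using Nat.strong_induction_on with
  | _ m ih =>
    rw [Nat.toDigits_eq_if (by norm_num)]
    split_ifs with h
    · intro c hc
      simp only [List.mem_singleton] at hc; subst hc
      interval_cases m <;> simp [Nat.digitChar]
    · intro c hc
      rw [List.mem_append] at hc
      rcases hc with hc | hc
      · exact ih (m / 2) (by omega) c hc
      · simp only [List.mem_singleton] at hc; subst hc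
        rcases Nat.mod_two_eq_zero_or_one m with h2 | h2 <;> rw [h2] <;> simp [Nat.digitChar]

theorem pv_zfill_no_sign (xs : List Char) (w : Int) (hne : xs ≠ [])
    (hh : ∀ c ∈ xs.take 1, c ≠ '+' ∧ c ≠ '-') :
    PySem.Chars.zfill xs w = List.replicate (w.toNat - xs.length) '0' ++ xs := by
  match xs, hne with
  | c :: rest, _ =>
    have hc := hh c (by simp)
    rw [PySem.Chars.zfill]
    split_ifs with h1 h2
    · have : w.toNat ≤ (c :: rest).length := by omega
      rw [Nat.sub_eq_zero_of_le this]; simp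
    · exact absurd h2 (by tauto)
    · rfl

theorem pv_dec_toDigits (m : Nat) : pvDec (Nat.toDigits 2 m) = m := by
  induction m using Nat.strong_induction_on with
  | _ m ih =>
    rw [Nat.toDigits_eq_if (by norm_num)]
    split_ifs with h
    · interval_cases m <;> simp [pvDec, Nat.digitChar]
    · have hrec := ih (m / 2) (by omega)
      rcases Nat.mod_two_eq_zero_or_one m with h2 | h2 <;>
        simp [pvDec, List.foldl_append, h2, Nat.digitChar] at hrec ⊢ <;>
        rw [hrec] <;> omega

theorem pv_dec_pad (j : Nat) (xs : List Char) :
    pvDec (List.replicate j '0' ++ xs) = pvDec xs := by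
  have h0 : List.foldl (fun a c => 2 * a + (if c = '1' then 1 else 0)) 0 (List.replicate j '0') = 0 := by
    induction j with
    | zero => simp
    | succ j ihj => simpa [List.replicate_succ] using ihj
  simp [pvDec, List.foldl_append, h0]

theorem pv_toDigits_head (m : Nat) : ∀ c ∈ (Nat.toDigits 2 m).take 1, c ≠ '+' ∧ c ≠ '-' := by
  intro c hc
  have := pv_toDigits_bits m c (List.mem_of_mem_take hc)
  rcases this with h | h <;> subst h <;> exact ⟨by decide, by decide⟩

theorem pv_get_bin_toList (x : Int) (hx : 0 ≤ x) (n : Int) :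
    (get_bin x n).toList = PySem.Chars.zfill (Nat.toDigits 2 x.toNat) n := by
  simp [get_bin, PySem.Str.toList_zfill, PySem.Int.toList_toBin, PySem.Int.toBinChars,
    not_lt.mpr hx]

theorem pv_dec_zfill (m : Nat) (w : Int) :
    pvDec (PySem.Chars.zfill (Nat.toDigits 2 m) w) = m := by
  rw [pv_zfill_no_sign _ _ (List.ne_nil_of_length_pos Nat.length_toDigits_pos) (pv_toDigits_head m),
    pv_dec_pad, pv_dec_toDigits]

theorem pv_get_bin_inj (x y n : Int) (hx : 0 ≤ x) (hy : 0 ≤ y)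
    (h : get_bin x n = get_bin y n) : x = y := by
  have := congrArg String.toList h
  rw [pv_get_bin_toList x hx, pv_get_bin_toList y hy] at this
  have h2 := congrArg pvDec this
  rw [pv_dec_zfill, pv_dec_zfill] at h2
  omega

theorem pv_lowVal_eq_zero (t : List Int) (h : ∀ v ∈ t, v = 0 ∨ v = 1)
    (h0 : pvLowVal t = 0) : ∀ v ∈ t, v = 0 := by
  induction t with
  | nil => simp
  | cons v t ih =>
    have hb := pv_lowVal_bounds t (fun x hx => h x (List.mem_cons_of_mem _ hx))
    have hv := h v (List.mem_cons_self ..)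
    simp only [pvLowVal] at h0
    intro x hx
    rcases List.mem_cons.mp hx with rfl | hx
    · omega
    · exact ih (fun x hx => h x (List.mem_cons_of_mem _ hx)) (by omega) x hx

theorem pv_bits_key (vs : List Int) (hne : vs ≠ []) (h : ∀ v ∈ vs, v = 0 ∨ v = 1) :
    PySem.Chars.zfill (Nat.toDigits 2 (pvLowVal vs).toNat) ((vs.length : Nat) : Int)
      = (vs.map pvBitc).reverse := by
  induction vs with
  | nil => exact absurd rfl hne
  | cons v t ih =>
    have hv := h v (List.mem_cons_self ..)
    have ht : ∀ x ∈ t, x = 0 ∨ x = 1 := fun x hx => h x (List.mem_cons_of_mem _ hx)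
    have hb := pv_lowVal_bounds t ht
    by_cases hM : pvLowVal t = 0
    · -- tail is all zeros
      have hz := pv_lowVal_eq_zero t ht hM
      have hmap : t.map pvBitc = List.replicate t.length '0' := by
        rw [List.eq_replicate_iff]
        refine ⟨by simp, ?_⟩
        intro c hc
        rcases List.mem_map.mp hc with ⟨x, hx, rfl⟩
        rw [hz x hx]; rfl
      have hlow : pvLowVal (v :: t) = v := by simp [pvLowVal, hM]
      rcases hv with rfl | rfl
      · rw [hlow, show ((0 : Int)).toNat = 0 from rfl, Nat.toDigits_zero]
        rw [pv_zfill_no_sign _ _ (by simp)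
          (by intro c hc; simp only [List.take_succ_cons, List.take_zero, List.mem_singleton] at hc
              subst hc; exact ⟨by decide, by decide⟩)]
        simp only [List.map_cons, List.reverse_cons, hmap, List.reverse_replicate,
          Int.toNat_natCast, pvBitc, if_neg (by norm_num : ¬ (0 : Int) = 1)]
        rw [← List.replicate_succ', List.replicate_succ']
        simp
      · rw [hlow, show Nat.toDigits 2 ((1 : Int)).toNat = ['1'] from rfl]
        rw [pv_zfill_no_sign _ _ (by simp)
          (by intro c hc; simp only [List.take_succ_cons, List.take_zero, List.mem_singleton] at hc
              subst hc; exact ⟨by decide, by decide⟩)]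
        simp [hmap, List.reverse_replicate, pvBitc]
    · -- tail value positive: binary digits split as digits(M) ++ [bit v]
      have htne : t ≠ [] := by rintro rfl; simp [pvLowVal] at hM
      have hM1 : 1 ≤ pvLowVal t := by omega
      have hbN : (pvLowVal t).toNat < 2 ^ t.length := by
        have h2 := hb.2
        have : ((pvLowVal t).toNat : Int) < ((2 ^ t.length : Nat) : Int) := by push_cast; omega
        exact_mod_cast this
      have hm2 : 2 ≤ (pvLowVal (v :: t)).toNat := by simp only [pvLowVal]; omega
      have hdiv : (pvLowVal (v :: t)).toNat / 2 = (pvLowVal t).toNat := by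
        simp only [pvLowVal]; omega
      have hmod : ((pvLowVal (v :: t)).toNat % 2).digitChar = pvBitc v := by
        have : (pvLowVal (v :: t)).toNat % 2 = v.toNat := by simp only [pvLowVal]; omega
        rw [this]
        rcases hv with rfl | rfl <;> rfl
      rw [Nat.toDigits_eq_if (by norm_num), if_neg (by omega), hdiv, hmod]
      have hnD : (Nat.toDigits 2 (pvLowVal t).toNat) ≠ [] :=
        List.ne_nil_of_length_pos Nat.length_toDigits_pos
      have hlenD : (Nat.toDigits 2 (pvLowVal t).toNat).length ≤ t.length :=
        (Nat.length_toDigits_le_iff (by norm_num) (List.length_pos_of_ne_nil htne)).mpr hbN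
      have ihe := ih htne ht
      rw [pv_zfill_no_sign _ _ hnD (pv_toDigits_head _)] at ihe
      have hhead : ∀ c ∈ (Nat.toDigits 2 (pvLowVal t).toNat ++ [pvBitc v]).take 1,
          c ≠ '+' ∧ c ≠ '-' := by
        intro c hc
        have : c ∈ (Nat.toDigits 2 (pvLowVal t).toNat).take 1 := by
          rcases hD : Nat.toDigits 2 (pvLowVal t).toNat with _ | ⟨d, rest⟩
          · exact absurd hD hnD
          · rw [hD] at hc; simpa using hc
        exact pv_toDigits_head _ c this
      rw [pv_zfill_no_sign _ _ (by simp [hnD]) hhead]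
      simp only [List.length_append, List.length_cons, List.map_cons, List.reverse_cons, ← ihe]
      rw [← List.append_assoc]
      congr 2
      congr 1
      simp only [List.length_nil]
      omega

-- length of A's histogram vector is invariant under the update loop
theorem pv_vec_len (rs : List (List (String × Int))) (idx : List (String × Int) → Int)
    (vec : List Int) :
    (rs.foldl (fun v r => PySem.List.pySetD v (idx r) (PySem.List.pyGetD v (idx r) 0 + 1)) vec).length
      = vec.length := by
  induction rs generalizing vec with
  | nil => rfl
  | cons r rest ih => rw [List.foldl_cons, ih, PySem.List.length_pySetD]

-- A's vector update loop counts, per cell, the rounds whose address hits that cell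
theorem pv_vec_fold (rs : List (List (String × Int))) (idx : List (String × Int) → Int)
    (vec : List Int) (h : ∀ r ∈ rs, 0 ≤ idx r ∧ (idx r).toNat < vec.length) (i : Nat)
    (hi : i < vec.length) :
    (rs.foldl (fun v r => PySem.List.pySetD v (idx r) (PySem.List.pyGetD v (idx r) 0 + 1)) vec).getD i 0
      = vec.getD i 0 + (rs.countP (fun r => decide ((idx r).toNat = i)) : Int) := by
  induction rs generalizing vec with
  | nil => simp
  | cons r rest ih =>
    have hr := h r (List.mem_cons_self ..)
    rw [List.foldl_cons, PySem.List.pySetD_of_nonneg _ _ hr.1, PySem.List.pyGetD_of_nonneg _ _ hr.1]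
    rw [ih _ (by intro x hx; rw [List.length_set]; exact h x (List.mem_cons_of_mem _ hx))
        (by rwa [List.length_set]), List.countP_cons]
    simp only [List.getD_eq_getElem?_getD, List.getElem?_set]
    by_cases hij : (idx r).toNat = i
    · simp [hij, hi]
      omega
    · simp [hij]

-- the dict value looked up for a present key is one of the round's recorded bits
theorem pv_val_bit (r : List (String × Int)) (hnod : (r.map Prod.fst).Nodup)
    (hbit : ∀ p ∈ r, p.2 = 0 ∨ p.2 = 1) (q : String) (hq : q ∈ r.map Prod.fst) :
    PySem.Dict.getD (PySem.Dict.mk r) q 0 = 0 ∨ PySem.Dict.getD (PySem.Dict.mk r) q 0 = 1 := by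
  rcases List.mem_map.mp hq with ⟨p, hp, rfl⟩
  have hget : (PySem.Dict.mk r).get? p.1 = some p.2 := by
    apply PySem.Dict.get?_of_mem_items
    · simpa using hp
    · simpa [PySem.Dict.keys_mk] using hnod
  rw [PySem.Dict.getD_of_get?_eq_some _ _ hget]
  exact hbit p hp

-- B's bitstring key of a round is A's get_bin of that round's integer address
theorem pv_key_eq (names : List String) (f : String → Int) (hne : names ≠ [])
    (hb : ∀ q ∈ names, f q = 0 ∨ f q = 1) :
    PySem.Str.join "" (names.reverse.map (fun q => PySem.Int.toStr (f q)))
      = get_bin (pvLowVal (names.map f)) ((names.length : Nat) : Int) := by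
  have hvb : ∀ v ∈ names.map f, v = 0 ∨ v = 1 := by
    intro v hv; rcases List.mem_map.mp hv with ⟨q, hq, rfl⟩; exact hb q hq
  have hbounds := pv_lowVal_bounds _ hvb
  apply String.toList_inj.mp
  rw [pv_get_bin_toList _ hbounds.1, show ((names.length : Nat) : Int) = (((names.map f).length : Nat) : Int) by rw [List.length_map],
    pv_bits_key _ (by simpa using hne) hvb]
  rw [PySem.Str.toList_join]
  have h1 : (names.reverse.map (fun q => PySem.Int.toStr (f q))).map String.toList
      = (names.reverse.map (fun q => pvBitc (f q))).map (fun c => [c]) := by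
    rw [List.map_map, List.map_map]
    apply List.map_congr_left
    intro q hq
    rcases hb q (List.mem_reverse.mp hq) with h | h <;> simp only [Function.comp] <;>
      rw [h] <;> decide
  rw [h1]
  simp only [show ("" : String).toList = [] from rfl]
  rw [PySem.Chars.join_nil_singletons, List.map_reverse, List.map_map]
  rfl

-- accumulator decomposition of the decoder
theorem pv_dec_acc (t : List Char) (a : Nat) :
    t.foldl (fun a c => 2 * a + (if c = '1' then 1 else 0)) a
      = a * 2 ^ t.length + t.foldl (fun a c => 2 * a + (if c = '1' then 1 else 0)) 0 := by
  induction t generalizing a with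
  | nil => simp
  | cons c t ih =>
    rw [List.foldl_cons, List.foldl_cons, ih, ih (2 * 0 + _)]
    simp only [List.length_cons, pow_succ]
    ring

theorem pv_dec_cons (c : Char) (t : List Char) :
    pvDec (c :: t) = (if c = '1' then 1 else 0) * 2 ^ t.length + pvDec t := by
  simp only [pvDec, List.foldl_cons, Nat.mul_zero, Nat.zero_add]
  exact pv_dec_acc t _

theorem pv_dec_lt (cs : List Char) (h : ∀ c ∈ cs, c = '0' ∨ c = '1') :
    pvDec cs < 2 ^ cs.length := by
  induction cs with
  | nil => simp [pvDec]
  | cons c t ih =>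
    have := ih (fun x hx => h x (List.mem_cons_of_mem _ hx))
    rw [pv_dec_cons]
    rcases h c (List.mem_cons_self ..) with rfl | rfl
    · simp only [List.length_cons, pow_succ, if_neg (by decide : ¬('0' : Char) = '1')]
      omega
    · rw [if_pos rfl]
      simp only [List.length_cons, pow_succ]
      omega

-- for equal-length bit lists, smaller decoded value means lexicographically smaller
theorem pv_bits_lex (cs ds : List Char) (hlen : cs.length = ds.length)
    (hc : ∀ c ∈ cs, c = '0' ∨ c = '1') (hd : ∀ c ∈ ds, c = '0' ∨ c = '1')
    (hv : pvDec cs < pvDec ds) : List.Lex (· < ·) cs ds := by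
  induction cs generalizing ds with
  | nil =>
    match ds, hlen with
    | [], _ => exact absurd hv (by simp [pvDec])
  | cons c t ih =>
    match ds, hlen with
    | d :: u, hlen =>
      have hlen' : t.length = u.length := by simpa using hlen
      have hct := fun x hx => hc x (List.mem_cons_of_mem _ hx)
      have hdu := fun x hx => hd x (List.mem_cons_of_mem _ hx)
      by_cases hcd : c = d
      · subst hcd
        apply List.Lex.cons
        refine ih u hlen' hct hdu ?_
        rw [pv_dec_cons, pv_dec_cons, hlen'] at hv
        omega
      · rcases hc c (List.mem_cons_self ..) with rfl | rfl <;>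
          rcases hd d (List.mem_cons_self ..) with rfl | rfl
        · exact absurd rfl hcd
        · exact List.Lex.rel (by decide)
        · exfalso
          have h1 := pv_dec_lt u hdu
          rw [pv_dec_cons, pv_dec_cons, hlen'] at hv
          rw [if_pos rfl, if_neg (by decide : ¬ ('0' : Char) = '1')] at hv
          omega
        · exact absurd rfl hcd

-- the toList of get_bin i n, for 0 ≤ i < 2^n, is an n-long bit list decoding to i
theorem pv_get_bin_shape (i : Nat) (n : Nat) (hn : 0 < n) (hi : i < 2 ^ n) :
    (get_bin (i : Int) ((n : Nat) : Int)).toList.length = n ∧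
    (∀ c ∈ (get_bin (i : Int) ((n : Nat) : Int)).toList, c = '0' ∨ c = '1') ∧
    pvDec (get_bin (i : Int) ((n : Nat) : Int)).toList = i := by
  rw [pv_get_bin_toList _ (Int.natCast_nonneg i), Int.toNat_natCast]
  have hlenD : (Nat.toDigits 2 i).length ≤ n := by
    rcases Nat.eq_zero_or_pos i with rfl | hip
    · simpa [Nat.toDigits_zero] using hn
    · exact (Nat.length_toDigits_le_iff (by norm_num) hn).mpr hi
  rw [pv_zfill_no_sign _ _ (List.ne_nil_of_length_pos Nat.length_toDigits_pos)
    (pv_toDigits_head i)]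
  refine ⟨?_, ?_, ?_⟩
  · simp only [List.length_append, List.length_replicate, Int.toNat_natCast]
    omega
  · intro c hcm
    rcases List.mem_append.mp hcm with hcm | hcm
    · left; exact List.eq_of_mem_replicate hcm
    · exact pv_toDigits_bits i c hcm
  · rw [pv_dec_pad, pv_dec_toDigits]

-- the enumeration of the 2^n patterns is strictly increasing in Python's string order
theorem pv_get_bin_strict_mono (n : Nat) (hn : 0 < n) (i j : Nat) (hi : i < 2 ^ n)
    (hj : j < 2 ^ n) (hij : i < j) :
    get_bin (i : Int) ((n : Nat) : Int) < get_bin (j : Int) ((n : Nat) : Int) := by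
  obtain ⟨hl1, hb1, hv1⟩ := pv_get_bin_shape i n hn hi
  obtain ⟨hl2, hb2, hv2⟩ := pv_get_bin_shape j n hn hj
  rw [String.lt_iff_toList_lt]
  exact pv_bits_lex _ _ (by omega) hb1 hb2 (by omega)

-- a sorted run whose values all lie in e :: rest, with e below every element of rest:
-- the stretch of e's is an initial run of length count, and dropping it removes all e's
theorem pv_run_split (l : List String) (e : String) (hl : l.Pairwise (· ≤ ·))
    (hall : ∀ x ∈ l, x = e ∨ e < x) :
    (l.takeWhile (fun k => k == e)).length = l.count e ∧
    l.dropWhile (fun k => k == e) = l.filter (fun k => !(k == e)) := by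
  induction l with
  | nil => simp
  | cons x t ih =>
    have hlt := List.pairwise_cons.mp hl
    have ht := ih hlt.2 (fun y hy => hall y (List.mem_cons_of_mem _ hy))
    by_cases hxe : x = e
    · subst hxe
      refine ⟨?_, ?_⟩
      · rw [List.takeWhile_cons_of_pos (by simp), List.count_cons_self]
        simp [ht.1]
      · rw [List.dropWhile_cons_of_pos (by simp), ht.2, List.filter_cons_of_neg (by simp)]
    · have hex : e < x := by rcases hall x (List.mem_cons_self ..) with h | h; exact absurd h hxe; exact h
      have hnoe : ∀ y ∈ x :: t, y ≠ e := by
        intro y hy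
        rcases List.mem_cons.mp hy with rfl | hy
        · exact hxe
        · intro hye; subst hye
          exact absurd (hlt.1 y hy) (not_le.mpr hex)
      constructor
      · rw [List.takeWhile_cons_of_neg (by simpa using hxe)]
        simp only [List.length_nil]
        symm
        rw [List.count_eq_zero]
        intro hmem
        exact hnoe e hmem rfl
      · rw [List.dropWhile_cons_of_neg (by simpa using hxe)]
        symm
        rw [List.filter_eq_self]
        intro y hy
        simpa using hnoe y hy

-- the merge of the sorted run against a strictly increasing enumeration covering all its
-- elements produces, per enumerated key, the key's multiplicity in the run
theorem pv_merge_fold (es : List String) (d0 : PySem.Dict String Int) (l : List String)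
    (hes : es.Pairwise (· < ·)) (hl : l.Pairwise (· ≤ ·)) (hsub : ∀ x ∈ l, x ∈ es) :
    (es.foldl (fun (st : PySem.Dict String Int × List String) e =>
        (st.1.insert e ((st.2.takeWhile (fun k => k == e)).length : Int),
         st.2.dropWhile (fun k => k == e))) (d0, l)).1
      = es.foldl (fun d e => d.insert e ((l.count e : Nat) : Int)) d0 := by
  induction es generalizing d0 l with
  | nil => rfl
  | cons e rest ih =>
    have hpc := List.pairwise_cons.mp hes
    have hall : ∀ x ∈ l, x = e ∨ e < x := by
      intro x hx
      rcases List.mem_cons.mp (hsub x hx) with rfl | hxr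
      · exact Or.inl rfl
      · exact Or.inr (hpc.1 x hxr)
    obtain ⟨hrun, hdrop⟩ := pv_run_split l e hl hall
    rw [List.foldl_cons, List.foldl_cons]
    simp only [hrun, hdrop]
    rw [ih _ _ hpc.2 (List.Pairwise.sublist List.filter_sublist hl)
        (by intro x hx
            have hxl := List.mem_of_mem_filter hx
            have hxe : ¬ (x == e) = true := by
              have := List.of_mem_filter hx; simpa using this
            rcases List.mem_cons.mp (hsub x hxl) with rfl | hxr
            · exact absurd (by simp) hxe
            · exact hxr)]
    apply PySem.List.foldl_congr_mem
    intro d x hx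
    have hxe : (!(x == e)) = true := by
      simp only [Bool.not_eq_true', beq_eq_false_iff_ne, ne_eq]
      intro hxx; subst hxx; exact absurd (hpc.1 x hx) (lt_irrefl x)
    rw [List.count_filter (p := fun k => !(k == e)) hxe]

-- B's counting: the sorted run of round keys counts, per key, the matching rounds
theorem pv_count_map (l : List (List (String × Int))) (K : List (String × Int) → String)
    (s : String) : (l.map K).count s = l.countP (fun r => K r == s) := by
  simp [List.count_eq_countP, List.countP_map, Function.comp_def]

-- the 2^n zero-filled binary keys are pairwise distinct
theorem pv_keys_nodup (L : Nat) (w : Int) :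
    ((List.range L).map (fun (i : Nat) => get_bin (i : Int) w)).Nodup := by
  rw [List.nodup_map_iff_inj_on List.nodup_range]
  intro x _ y _ hxy
  exact_mod_cast pv_get_bin_inj (x : Int) (y : Int) w (by positivity) (by positivity) hxy

-- ===== VERDICT (by name: the statement is the Claim_ definition above) =====
theorem count_final_result_spec : Claim_equal_count_final_result := by
  intro fr hdom hpre
  unfold Spec_count_final_result
  match fr, hpre with
  | [], _ => rfl
  | first :: rest, hpre =>
    by_cases h0 : first.length = 0
    · simp [count_final_result, count_final_result_alt, h0]
    · have hP := hpre first (by simp)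
      rcases hP with hP | hP
      · exact absurd hP h0
      simp only [count_final_result, count_final_result_alt, List.length_cons,
        List.headD_cons, List.length_map, if_neg h0,
        PySem.List.foldl_append_singleton_eq_map, List.nil_append]
      rw [if_neg (show ¬(rest.length + 1 = 0) by omega)]
      split_ifs with hc1 hc2 hc3
      · rfl
      · exfalso
        simp only [Bool.not_eq_true', List.all_eq_false, decide_eq_true_eq] at hc1 hc2
        tauto
      · exfalso
        simp only [Bool.not_eq_true', List.all_eq_false, decide_eq_true_eq] at hc1 hc3
        tauto
      -- both sides are now `some (name_list, items)`; compare componentwise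
      have hnl0 : List.map Prod.fst first ≠ [] := by
        intro hx; exact h0 (by simpa using congrArg List.length hx)
      have hn0 : 0 < first.length := by omega
      -- per-round facts: the address is the little-endian bit value, in range,
      -- and B's key is get_bin of it
      have hfact : ∀ r ∈ first :: rest,
          (List.foldl (fun (st : Int × Nat) qubit_name =>
              (st.1 + PySem.Dict.getD (PySem.Dict.mk r) qubit_name 0 <<< st.2, st.2 + 1))
            ((0 : Int), (0 : Nat)) (List.map Prod.fst first)).1
            = pvLowVal ((List.map Prod.fst first).map
                (fun qq => PySem.Dict.getD (PySem.Dict.mk r) qq 0)) ∧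
          (0 ≤ pvLowVal ((List.map Prod.fst first).map
                (fun qq => PySem.Dict.getD (PySem.Dict.mk r) qq 0)) ∧
           pvLowVal ((List.map Prod.fst first).map
                (fun qq => PySem.Dict.getD (PySem.Dict.mk r) qq 0)) < 2 ^ first.length) ∧
          PySem.Str.join "" ((List.map Prod.fst first).reverse.map
              (fun qq => PySem.Int.toStr (PySem.Dict.getD (PySem.Dict.mk r) qq 0)))
            = get_bin (pvLowVal ((List.map Prod.fst first).map
                (fun qq => PySem.Dict.getD (PySem.Dict.mk r) qq 0))) ((first.length : Nat) : Int) := by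
        intro r hr
        obtain ⟨hlen, hnod, hsub, hbit⟩ := hP r hr
        have hqb : ∀ qq ∈ List.map Prod.fst first,
            PySem.Dict.getD (PySem.Dict.mk r) qq 0 = 0 ∨
            PySem.Dict.getD (PySem.Dict.mk r) qq 0 = 1 :=
          fun qq hq => pv_val_bit r hnod hbit qq (hsub qq hq)
        have hvb : ∀ v ∈ (List.map Prod.fst first).map
            (fun qq => PySem.Dict.getD (PySem.Dict.mk r) qq 0), v = 0 ∨ v = 1 := by
          intro v hv; rcases List.mem_map.mp hv with ⟨qq, hq, rfl⟩; exact hqb qq hq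
        have hb := pv_lowVal_bounds _ hvb
        refine ⟨?_, ⟨hb.1, ?_⟩, ?_⟩
        · rw [pv_addr_foldl]; simp
        · simpa using hb.2
        · rw [pv_key_eq _ _ hnl0 hqb]; simp
      simp only [Option.some.injEq, Prod.mk.injEq]
      refine ⟨by trivial, ?_⟩
      -- the strictly increasing enumeration of the 2^n patterns
      have hesinc : ((List.range (2 ^ first.length)).map
          (fun (i : Nat) => get_bin (i : Int) ((first.length : Nat) : Int))).Pairwise (· < ·) := by
        rw [List.pairwise_map]
        exact List.Pairwise.imp_of_mem
          (fun {a b} ha hb hab => pv_get_bin_strict_mono first.length hn0 a b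
            (List.mem_range.mp ha) (List.mem_range.mp hb) hab)
          List.pairwise_lt_range
      -- B's merge fold collapses to a congruent insert fold
      rw [show ((List.range (2 ^ first.length)).foldl
            (fun (st : PySem.Dict String Int × List String) (i : Nat) =>
              (st.1.insert (get_bin (i : Int) ((first.length : Nat) : Int))
                 ((st.2.takeWhile (fun k => k == get_bin (i : Int) ((first.length : Nat) : Int))).length : Int),
               st.2.dropWhile (fun k => k == get_bin (i : Int) ((first.length : Nat) : Int))))
            (PySem.Dict.empty, PySem.List.sorted ((first :: rest).map (fun r =>
              PySem.Str.join "" ((List.map Prod.fst first).reverse.map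
                (fun qq => PySem.Int.toStr (PySem.Dict.getD (PySem.Dict.mk r) qq 0)))))
              (fun s => s) false))
          = (((List.range (2 ^ first.length)).map
              (fun (i : Nat) => get_bin (i : Int) ((first.length : Nat) : Int))).foldl
            (fun (st : PySem.Dict String Int × List String) e =>
              (st.1.insert e ((st.2.takeWhile (fun k => k == e)).length : Int),
               st.2.dropWhile (fun k => k == e)))
            (PySem.Dict.empty, PySem.List.sorted ((first :: rest).map (fun r =>
              PySem.Str.join "" ((List.map Prod.fst first).reverse.map
                (fun qq => PySem.Int.toStr (PySem.Dict.getD (PySem.Dict.mk r) qq 0)))))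
              (fun s => s) false))
          by rw [List.foldl_map]]
      rw [pv_merge_fold _ _ _ hesinc
          (PySem.List.sorted_pairwise _ _)
          (by intro x hx
              rw [PySem.List.mem_sorted] at hx
              rcases List.mem_map.mp hx with ⟨r, hr, rfl⟩
              obtain ⟨_, ⟨hge, hlt⟩, hk⟩ := hfact r hr
              rw [hk]
              apply List.mem_map.mpr
              refine ⟨(pvLowVal ((List.map Prod.fst first).map
                (fun qq => PySem.Dict.getD (PySem.Dict.mk r) qq 0))).toNat, ?_, ?_⟩
              · rw [List.mem_range]
                have h2 : ((2 : Int) ^ first.length) = (((2 ^ first.length : Nat) : Int)) := by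
                  push_cast; ring
                rw [h2] at hlt
                omega
              · congr 1
                omega)]
      -- normalise A's range bound; rewrite both result dicts to their items lists
      simp only [pv_vec_len, List.length_replicate, PySem.List.pyRange_zero_natCast]
      rw [PySem.Dict.items_foldl_insert_fresh _ _ _ _
            (fun a _ => PySem.Dict.contains_empty _)
            (by rw [List.map_map]
                exact pv_keys_nodup (2 ^ first.length) ((first.length : Nat) : Int)),
          List.foldl_map,
          PySem.Dict.items_foldl_insert_fresh _ _ _ _
            (fun a _ => PySem.Dict.contains_empty _)
            (pv_keys_nodup (2 ^ first.length) ((first.length : Nat) : Int))]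
      simp only [show (PySem.Dict.empty : PySem.Dict String Int).items = [] from rfl,
        List.nil_append, List.map_map]
      apply List.map_congr_left
      intro i hi
      rw [List.mem_range] at hi
      simp only [Function.comp, Prod.mk.injEq]
      refine ⟨by trivial, ?_⟩
      -- left: A's vector cell; right: the multiplicity in the sorted run
      rw [PySem.List.pyGetD_of_nonneg _ _ (Int.natCast_nonneg i), Int.toNat_natCast]
      rw [pv_vec_fold (first :: rest) _ (List.replicate (2 ^ first.length) 0)
            (by intro r hr
                rw [(hfact r hr).1, List.length_replicate]
                refine ⟨(hfact r hr).2.1.1, ?_⟩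
                have h1 := (hfact r hr).2.1.1
                have h2 := (hfact r hr).2.1.2
                have : ((pvLowVal ((List.map Prod.fst first).map
                    (fun qq => PySem.Dict.getD (PySem.Dict.mk r) qq 0))).toNat : Int)
                    < (((2 : Nat) ^ first.length : Nat) : Int) := by push_cast; omega
                exact_mod_cast this)
            i (by rwa [List.length_replicate])]
      rw [List.getD_replicate _ hi, zero_add]
      rw [(PySem.List.sorted_perm _ _ _).count_eq, pv_count_map]
      congr 1
      apply List.countP_congr
      intro r hr
      obtain ⟨ha, ⟨hge, hlt⟩, hk⟩ := hfact r hr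
      rw [ha, hk]
      constructor
      · intro h
        rw [decide_eq_true_eq] at h
        have : pvLowVal ((List.map Prod.fst first).map
            (fun qq => PySem.Dict.getD (PySem.Dict.mk r) qq 0)) = (i : Int) := by omega
        rw [this, beq_iff_eq]
      · intro h
        rw [beq_iff_eq] at h
        have := pv_get_bin_inj _ _ _ hge (Int.natCast_nonneg i) h
        rw [decide_eq_true_eq]
        omega
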